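-- pv_equiv track=rewrite | github.com/anjsimmo/codejam2021 | r1c_2021/p3_double_or_noting/double_or_noting_set2.py | flip
-- ===== SOURCE A (Python) =====
-- def flip(X, drop_leading=True):
--     flipped = "".join(["1" if x=="0" else "0" for x in X])
--     if "1" in flipped:
--         if drop_leading:
--             return flipped[flipped.index("1"):]
--         else:
--             return flipped
--     else:
--         return "0"
-- ===== SOURCE B (Python) =====
-- def flip(X, drop_leading=True):
--     # Single-pass state machine: while 'skipping' we discard characters that
--     # would flip to '0' (everything except '0'); the first '0' of X ends the
--     # skip and sets 'seen_zero'. Without drop_leading we never skip.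
--     out = []
--     skipping = drop_leading
--     seen_zero = False
--     for c in X:
--         if c == "0":
--             skipping = False
--             seen_zero = True
--             out.append("1")
--         elif not skipping:
--             out.append("0")
--     return "".join(out) if seen_zero else "0"
-- ===== Notes on version B (the rewrite author's own statement) =====
-- stated objective: alternative
-- what changed: B is a single-pass state machine over X with an output accumulator and skip/seen flags, instead of A's staged passes (build the fully flipped string, search it for '1', then slice); the all-ones/empty collapse comes from the seen flag rather than a membership test on the flipped string.
import Mathlib
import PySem

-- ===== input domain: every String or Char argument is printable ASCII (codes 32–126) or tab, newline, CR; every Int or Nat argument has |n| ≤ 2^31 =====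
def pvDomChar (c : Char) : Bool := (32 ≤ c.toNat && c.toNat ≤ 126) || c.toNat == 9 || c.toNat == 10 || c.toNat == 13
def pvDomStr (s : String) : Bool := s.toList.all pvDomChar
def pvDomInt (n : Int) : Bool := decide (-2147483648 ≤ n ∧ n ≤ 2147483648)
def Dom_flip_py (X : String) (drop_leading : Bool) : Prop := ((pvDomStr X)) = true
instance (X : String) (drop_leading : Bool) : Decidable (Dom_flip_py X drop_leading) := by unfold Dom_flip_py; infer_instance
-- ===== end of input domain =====

-- B replaces A's staged passes (flip everything, search for '1', slice) with one
-- streaming pass over X holding an accumulator and skip/seen flags; same results (alternative).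


-- ===== PORT A =====
-- Literal port of A: build the flipped char list, test '1' membership, slice from its first index.
-- ("1" in flipped and flipped.index("1") with a present single-char needle are exactly
-- List.contains/findIdx; flipped[i:] with 0 ≤ i ≤ len is exactly List.drop.)
def flip_py (X : String) (drop_leading : Bool) : String :=
  let flipped := X.toList.map (fun x => if x = '0' then '1' else '0')
  if flipped.contains '1' then
    if drop_leading then String.mk (flipped.drop (flipped.findIdx (· = '1')))
    else String.mk flipped
  else "0"

-- ===== PORT B =====
-- One step of B's loop body on the state (out, skipping, seen_zero).
def flipAltStep (st : List Char × Bool × Bool) (c : Char) : List Char × Bool × Bool :=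
  if c = '0' then (st.1 ++ ['1'], false, true)
  else if !st.2.1 then (st.1 ++ ['0'], st.2.1, st.2.2)
  else st

-- Port of B: single fold over X's characters, then the seen_zero test.
def flip_py_alt (X : String) (drop_leading : Bool) : String :=
  let s := X.toList.foldl flipAltStep ([], drop_leading, false)
  if s.2.2 then String.mk s.1 else "0"

-- ===== PRECONDITION & SPEC =====
def Spec_flip_py (X : String) (drop_leading : Bool) (out : String) : Prop := out = flip_py_alt X drop_leading
instance (X : String) (drop_leading : Bool) (out : String) : Decidable (Spec_flip_py X drop_leading out) := by unfold Spec_flip_py; infer_instance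

-- ===== CLAIM (what is proved, stated in full; the proofs are below) =====
def Claim_equal_flip_py : Prop := ∀ (X : String) (drop_leading : Bool), Dom_flip_py X drop_leading → Spec_flip_py X drop_leading (flip_py X drop_leading)

-- ===== LEMMAS AND PROOFS =====

-- the flipped string contains '1' iff X contains '0'
theorem pv_mapf_contains (l : List Char) :
    ((l.map (fun x => if x = '0' then '1' else '0')).contains '1') = l.contains '0' := by
  induction l with
  | nil => rfl
  | cons a t ih => by_cases h : a = '0' <;> simp [h, ih, eq_comm]

-- B's fold from a non-skipping state appends the flip of the rest and ORs '0'-membership into seen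
theorem pv_fold_nonskip (l : List Char) (out : List Char) (seen : Bool) :
    l.foldl flipAltStep (out, false, seen)
      = (out ++ l.map (fun x => if x = '0' then '1' else '0'), false, seen || l.contains '0') := by
  induction l generalizing out seen with
  | nil => simp
  | cons a t ih =>
    by_cases h : a = '0' <;>
      simp [flipAltStep, h, ih, List.append_assoc, eq_comm]

-- B's fold from a skipping state: no '0' leaves the state unchanged; a first '0' at index i
-- flips exactly the suffix from i on and sets seen
theorem pv_fold_skip (l : List Char) (out : List Char) (seen : Bool) :
    l.foldl flipAltStep (out, true, seen)
      = match l.findIdx? (· = '0') with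
        | none => (out, true, seen)
        | some i => (out ++ (l.drop i).map (fun x => if x = '0' then '1' else '0'), false, true) := by
  induction l generalizing out seen with
  | nil => simp
  | cons a t ih =>
    rw [List.findIdx?_cons]
    by_cases h : a = '0'
    · simp [flipAltStep, h, pv_fold_nonskip, List.append_assoc]
    · simp only [h, decide_false, cond_false]
      rw [List.foldl_cons]
      have : flipAltStep (out, true, seen) a = (out, true, seen) := by
        simp [flipAltStep, h]
      rw [this, ih]
      cases ht : t.findIdx? (· = '0') <;> simp

-- when X has a '0' at first index i, the flipped string's first '1' is at i
theorem pv_findIdx?_some (l : List Char) (i : Nat)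
    (h : l.findIdx? (· = '0') = some i) :
    (l.map (fun x => if x = '0' then '1' else '0')).findIdx (· = '1') = i ∧ l.contains '0' = true := by
  induction l generalizing i with
  | nil => simp [List.findIdx?, List.findIdx?.go] at h
  | cons a t ih =>
    rw [List.findIdx?_cons] at h
    by_cases ha : a = '0'
    · simp [ha] at h
      simp [ha, ← h, List.findIdx_cons]
    · simp [ha] at h
      obtain ⟨j, hj, rfl⟩ := h
      obtain ⟨h1, h2⟩ := ih j hj
      refine ⟨?_, by simp; exact Or.inr (by simpa using h2)⟩
      simp [List.findIdx_cons, ha, h1]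

theorem pv_findIdx?_none (l : List Char)
    (h : l.findIdx? (· = '0') = none) : l.contains '0' = false := by
  rw [List.findIdx?_eq_none_iff] at h
  simp only [List.contains_eq_mem, decide_eq_false_iff_not]
  intro hm
  simpa using h _ hm

-- ===== VERDICT (by name: the statement is the Claim_ definition above) =====
theorem flip_py_spec : Claim_equal_flip_py := by
  intro X d _
  unfold Spec_flip_py flip_py flip_py_alt
  cases d with
  | false =>
    dsimp only
    rw [pv_fold_nonskip, pv_mapf_contains]
    cases h : X.toList.contains '0' <;> simp [h]
  | true =>
    dsimp only
    rw [pv_fold_skip]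
    cases h : X.toList.findIdx? (· = '0') with
    | none =>
      rw [pv_mapf_contains, pv_findIdx?_none _ h]
      simp
    | some i =>
      obtain ⟨h1, h2⟩ := pv_findIdx?_some _ _ h
      rw [pv_mapf_contains, h2, h1]
      simp [List.map_drop]
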